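-- pv_equiv track=rewrite | github.com/mathew-felix/wildcam-motion-cnn | scripts/eval_vibe_mhi_cnn.py | _frames_to_intervals
-- ===== SOURCE A (Python) =====
-- from typing import Any, Dict, List, Optional, Tuple
--
-- def _frames_to_intervals(frames: List[int]) -> List[Tuple[int, int]]:
--     """Convert a list of positive frame indices into contiguous [start,end] intervals."""
--     if not frames:
--         return []
--     fr = sorted({int(x) for x in frames})
--     intervals: List[Tuple[int, int]] = []
--     s = e = fr[0]
--     for f in fr[1:]:
--         if f == e + 1:
--             e = f
--         else:
--             intervals.append((s, e))
--             s = e = f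
--     intervals.append((s, e))
--     return intervals
-- ===== SOURCE B (Python) =====
-- from typing import List, Tuple
--
-- def _frames_to_intervals(frames: List[int]) -> List[Tuple[int, int]]:
--     s = {int(x) for x in frames}
--     starts = sorted(x for x in s if x - 1 not in s)
--     ends = sorted(x for x in s if x + 1 not in s)
--     return list(zip(starts, ends))
-- ===== Notes on version B (the rewrite author's own statement) =====
-- stated objective: alternative
-- what changed: Replaces the sort-then-linear-run-coalescing scan by set-based boundary detection: x is an interval start iff x-1 is not in the set and an end iff x+1 is not, and the sorted starts are zipped with the sorted ends; no adjacency scan over the sorted list remains.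
import Mathlib
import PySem

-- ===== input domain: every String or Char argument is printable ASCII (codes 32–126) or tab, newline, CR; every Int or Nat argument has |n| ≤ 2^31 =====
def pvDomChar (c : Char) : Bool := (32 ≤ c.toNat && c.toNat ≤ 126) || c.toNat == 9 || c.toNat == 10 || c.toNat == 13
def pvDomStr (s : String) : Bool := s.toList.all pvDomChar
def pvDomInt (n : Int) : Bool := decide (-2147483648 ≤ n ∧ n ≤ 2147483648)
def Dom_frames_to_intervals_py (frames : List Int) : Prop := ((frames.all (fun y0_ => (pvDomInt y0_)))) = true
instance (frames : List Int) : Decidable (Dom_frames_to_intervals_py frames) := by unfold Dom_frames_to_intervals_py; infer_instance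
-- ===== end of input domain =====

-- B replaces A's run-coalescing scan over the sorted list with set-based boundary detection
-- (x is a start iff x-1 not in the set, an end iff x+1 not in the set; zip sorted starts with
-- sorted ends). Alternative algorithm, same cost; equivalence of the return value.

-- ===== PORT A =====
-- the for-loop over fr[1:] with state (intervals, s, e); appends (s, e) at the end
def ftiLoop (acc : List (Int × Int)) (s e : Int) : List Int → List (Int × Int)
  | [] => acc ++ [(s, e)]
  | f :: rest =>
      if f = e + 1 then ftiLoop acc s f rest
      else ftiLoop (acc ++ [(s, e)]) f f rest

def frames_to_intervals_py (frames : List Int) : List (Int × Int) :=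
  if frames = [] then []
  else
    match PySem.List.sorted (PySem.Set.ofList frames) (fun x => x) false with
    | [] => []            -- unreachable: sorted(set(frames)) of a nonempty list is nonempty
    | h :: t => ftiLoop [] h h t

-- ===== PORT B =====
-- s = set(frames); starts = sorted(x in s with x-1 not in s); ends = sorted(x in s with x+1 not in s); zip
def frames_to_intervals_py_alt (frames : List Int) : List (Int × Int) :=
  List.zip
    (PySem.List.sorted ((PySem.Set.ofList frames).filter
        (fun x => !(PySem.Set.contains (PySem.Set.ofList frames) (x - 1)))) (fun x => x) false)
    (PySem.List.sorted ((PySem.Set.ofList frames).filter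
        (fun x => !(PySem.Set.contains (PySem.Set.ofList frames) (x + 1)))) (fun x => x) false)

-- ===== PRECONDITION & SPEC =====
def Spec_frames_to_intervals_py (frames : List Int) (out : List (Int × Int)) : Prop := out = frames_to_intervals_py_alt frames
instance (frames : List Int) (out : List (Int × Int)) : Decidable (Spec_frames_to_intervals_py frames out) := by unfold Spec_frames_to_intervals_py; infer_instance

-- ===== CLAIM =====
def Claim_equal_frames_to_intervals_py : Prop := ∀ (frames : List Int), Dom_frames_to_intervals_py frames → Spec_frames_to_intervals_py frames (frames_to_intervals_py frames)

-- ===== LEMMAS AND PROOFS =====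

-- run starts after a previous element e (values only)
def startsAux (e : Int) : List Int → List Int
  | [] => []
  | f :: t => if f = e + 1 then startsAux f t else f :: startsAux f t

-- run ends, the current run having last-seen element e
def endsAux (e : Int) : List Int → List Int
  | [] => [e]
  | f :: t => if f = e + 1 then endsAux f t else e :: endsAux f t

lemma ftiLoop_acc (acc : List (Int × Int)) (s e : Int) (l : List Int) :
    ftiLoop acc s e l = acc ++ ftiLoop [] s e l := by
  induction l generalizing acc s e with
  | nil => simp [ftiLoop]
  | cons f rest ih =>
      simp only [ftiLoop]
      split_ifs with h
      · rw [ih acc, ih []]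
      · rw [ih (acc ++ [(s, e)]), ih ([] ++ [(s, e)])]; simp

-- A's loop is the zip of the run starts with the run ends
lemma ftiLoop_zip (l : List Int) (s e : Int) :
    ftiLoop [] s e l = List.zip (s :: startsAux e l) (endsAux e l) := by
  induction l generalizing s e with
  | nil => simp [ftiLoop, startsAux, endsAux]
  | cons f rest ih =>
      simp only [ftiLoop, startsAux, endsAux]
      split_ifs with h
      · exact ih s f
      · rw [ftiLoop_acc, ih f f]; simp [List.zip_cons_cons]

-- in a strictly increasing list, f-1 occurs iff f immediately follows its predecessor e
lemma adjS (pre : List Int) (e f : Int) (t : List Int)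
    (h : (pre ++ e :: f :: t).Pairwise (· < ·)) :
    ((f - 1) ∈ pre ++ e :: f :: t) ↔ f = e + 1 := by
  rw [List.pairwise_append] at h
  obtain ⟨-, h2, hcross⟩ := h
  rw [List.pairwise_cons] at h2
  obtain ⟨he, h3⟩ := h2
  rw [List.pairwise_cons] at h3
  obtain ⟨hf, -⟩ := h3
  have hef : e < f := he f (by simp)
  constructor
  · intro hm
    rcases List.mem_append.mp hm with hm | hm
    · have := hcross _ hm e (by simp); omega
    · rcases List.mem_cons.mp hm with hm | hm
      · omega
      · rcases List.mem_cons.mp hm with hm | hm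
        · omega
        · have := hf _ hm; omega
  · intro hm; subst hm; simp

-- e+1 never occurs when e is the last element
lemma adjE0 (pre : List Int) (e : Int)
    (h : (pre ++ [e]).Pairwise (· < ·)) : (e + 1) ∉ pre ++ [e] := by
  rw [List.pairwise_append] at h
  obtain ⟨-, -, hcross⟩ := h
  intro hm
  rcases List.mem_append.mp hm with hm | hm
  · have := hcross _ hm e (by simp); omega
  · simp at hm

-- e+1 occurs iff the next element f equals e+1
lemma adjE1 (pre : List Int) (e f : Int) (t : List Int)
    (h : (pre ++ e :: f :: t).Pairwise (· < ·)) :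
    ((e + 1) ∈ pre ++ e :: f :: t) ↔ f = e + 1 := by
  rw [List.pairwise_append] at h
  obtain ⟨-, h2, hcross⟩ := h
  rw [List.pairwise_cons] at h2
  obtain ⟨he, h3⟩ := h2
  rw [List.pairwise_cons] at h3
  obtain ⟨hf, -⟩ := h3
  have hef : e < f := he f (by simp)
  constructor
  · intro hm
    rcases List.mem_append.mp hm with hm | hm
    · have := hcross _ hm e (by simp); omega
    · rcases List.mem_cons.mp hm with hm | hm
      · omega
      · rcases List.mem_cons.mp hm with hm | hm
        · omega
        · have := hf _ hm; omega
  · intro hm; subst hm; simp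

-- filtering 'x-1 not in L₀' over the tail computes the run starts
lemma filter_starts (t : List Int) : ∀ (e : Int) (pre L₀ : List Int),
    L₀ = pre ++ e :: t → L₀.Pairwise (· < ·) →
    t.filter (fun x => !decide ((x - 1) ∈ L₀)) = startsAux e t := by
  induction t with
  | nil => intro _ _ _ _ _; rfl
  | cons f t ih =>
      intro e pre L₀ hL hp
      have hadj : ((f - 1) ∈ L₀) ↔ f = e + 1 := hL ▸ adjS pre e f t (hL ▸ hp)
      have hrec := ih f (pre ++ [e]) L₀ (by simp [hL]) hp
      simp only [startsAux]
      by_cases hc : f = e + 1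
      · have hb : (!decide ((f - 1) ∈ L₀)) = false := by simp [hadj.mpr hc]
        rw [if_pos hc, List.filter_cons, hb, if_neg (by simp), hrec]
      · have hb : (!decide ((f - 1) ∈ L₀)) = true := by simp [hc, hadj]
        rw [if_neg hc, List.filter_cons, hb, if_pos rfl, hrec]

-- filtering 'x+1 not in L₀' over the current run's suffix computes the run ends
lemma filter_ends (t : List Int) : ∀ (e : Int) (pre L₀ : List Int),
    L₀ = pre ++ e :: t → L₀.Pairwise (· < ·) →
    (e :: t).filter (fun x => !decide ((x + 1) ∈ L₀)) = endsAux e t := by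
  induction t with
  | nil =>
      intro e pre L₀ hL hp
      have hnm : (e + 1) ∉ L₀ := hL ▸ adjE0 pre e (hL ▸ hp)
      simp [endsAux, hnm]
  | cons f t ih =>
      intro e pre L₀ hL hp
      have hadj : ((e + 1) ∈ L₀) ↔ f = e + 1 := hL ▸ adjE1 pre e f t (hL ▸ hp)
      have hrec := ih f (pre ++ [e]) L₀ (by simp [hL]) hp
      simp only [endsAux]
      by_cases hc : f = e + 1
      · have hb : (!decide ((e + 1) ∈ L₀)) = false := by simp [hadj.mpr hc]
        rw [if_pos hc, List.filter_cons, hb, if_neg (by simp), hrec]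
      · have hb : (!decide ((e + 1) ∈ L₀)) = true := by simp [hadj, hc]
        rw [if_neg hc, List.filter_cons, hb, if_pos rfl, hrec]

-- the head of the strictly increasing list is always a start
lemma head_start (h : Int) (t : List Int) (hp : (h :: t).Pairwise (· < ·)) :
    (h - 1) ∉ h :: t := by
  rw [List.pairwise_cons] at hp
  intro hm
  rcases List.mem_cons.mp hm with hm | hm
  · omega
  · have := hp.1 _ hm; omega

-- sorting a filtered set equals filtering the sorted set (distinct Ints, identity key)
lemma sorted_filter_eq (s : List Int) (p : Int → Bool)
    (hp : (PySem.List.sorted s (fun x => x) false).Pairwise (· < ·)) :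
    PySem.List.sorted (s.filter p) (fun x => x) false =
      (PySem.List.sorted s (fun x => x) false).filter p :=
  PySem.List.sorted_eq_of_perm_of_pairwise_lt _ _ (fun x => x)
    ((PySem.List.sorted_perm s (fun x => x) false).filter p) (hp.filter p)

-- contains-on-the-set equals membership in the sorted set
lemma contains_eq_mem_sorted (frames : List Int) (y : Int) :
    PySem.Set.contains (PySem.Set.ofList frames) y =
      decide (y ∈ PySem.List.sorted (PySem.Set.ofList frames) (fun x => x) false) := by
  rw [Bool.eq_iff_iff]
  simp [PySem.List.mem_sorted]

-- ===== VERDICT =====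
theorem frames_to_intervals_py_spec : Claim_equal_frames_to_intervals_py := by
  intro frames _
  unfold Spec_frames_to_intervals_py frames_to_intervals_py frames_to_intervals_py_alt
  have e1 : (fun x : Int => !(PySem.Set.contains (PySem.Set.ofList frames) (x - 1))) =
      (fun x : Int => !decide ((x - 1) ∈ PySem.List.sorted (PySem.Set.ofList frames) (fun y => y) false)) :=
    funext fun x => by rw [contains_eq_mem_sorted]
  have e2 : (fun x : Int => !(PySem.Set.contains (PySem.Set.ofList frames) (x + 1))) =
      (fun x : Int => !decide ((x + 1) ∈ PySem.List.sorted (PySem.Set.ofList frames) (fun y => y) false)) :=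
    funext fun x => by rw [contains_eq_mem_sorted]
  rw [e1, e2]
  have hp := PySem.List.sorted_ofList_pairwise_lt (xs := frames)
  rw [sorted_filter_eq _ _ hp, sorted_filter_eq _ _ hp]
  by_cases hf : frames = []
  · subst hf; rfl
  · rw [if_neg hf]
    cases hsort : PySem.List.sorted (PySem.Set.ofList frames) (fun x => x) false with
    | nil =>
        exfalso
        obtain ⟨a, l, rfl⟩ := List.exists_cons_of_ne_nil hf
        have hm : a ∈ PySem.Set.ofList (a :: l) := (PySem.Set.mem_ofList (a :: l) a).mpr (by simp)
        have h2 : PySem.Set.ofList (a :: l) = [] :=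
          (PySem.List.sorted_eq_nil_iff _ _ _).mp hsort
        rw [h2] at hm
        simp at hm
    | cons h t =>
        rw [hsort] at hp
        have hs : (h :: t).filter (fun x => !decide ((x - 1) ∈ h :: t)) =
            h :: startsAux h t := by
          rw [List.filter_cons]
          have hh : (!decide ((h - 1) ∈ h :: t)) = true := by simp [head_start h t hp]
          rw [hh, if_pos rfl, filter_starts t h [] (h :: t) rfl hp]
        have he : (h :: t).filter (fun x => !decide ((x + 1) ∈ h :: t)) = endsAux h t :=
          filter_ends t h [] (h :: t) rfl hp
        change ftiLoop [] h h t = _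
        rw [ftiLoop_zip, hs, he]
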